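-- pv_equiv track=rewrite | github.com/rzmearns/spherapy | spherapy/util/list_u.py | contain_sublist
-- ===== SOURCE A (Python) =====
-- def contain_sublist(sub_list, search_list):
-- 	"""Determines if list `search_list` contains sub_list `sub_list
--
-- 	Parameters
-- 	----------
-- 	sub_list : {list}
-- 		list to search for
-- 	search_list : {list}
-- 		list to search through
--
-- 	Returns
-- 	-------
-- 	bool
-- 		True if contains sub_listist
--
-- 	# TODO: This can be made faster by using a non-naive string search algorithm
-- 	"""
--
-- 	if len(sub_list) > len(search_list):
-- 		return False
--
-- 	if sub_list == search_list:
-- 		return True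
--
-- 	len_sub = len(sub_list)
--
-- 	ext_l = search_list + search_list[:len_sub - 1]
--
-- 	for ii in range(len(search_list)):
-- 		if ext_l[ii:ii + len(sub_list)] == sub_list:
-- 			return True
-- 	return False
-- ===== SOURCE B (Python) =====
-- def contain_sublist(sub_list, search_list):
--     """Rabin-Karp-style cyclic containment: a rolling checksum over the doubled
--     list filters positions; the full slice comparison runs only on checksum hits."""
--     m = len(sub_list)
--     n = len(search_list)
--     if m > n:
--         return False
--     if m == 0:
--         return True
--     ext = search_list + search_list[:m - 1]
--     target = sum(sub_list)
--     h = sum(ext[:m])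
--     for ii in range(n):
--         if h == target and ext[ii:ii + m] == sub_list:
--             return True
--         if ii + m < len(ext):
--             h += ext[ii + m] - ext[ii]
--     return False
-- ===== Notes on version B (the rewrite author's own statement) =====
-- stated objective: faster
-- what changed: Replaces A's per-position O(m) slice comparison with a Rabin-Karp-style rolling checksum over the doubled list: the window sum is updated in O(1) per shift and the full slice is compared only when the checksum equals the pattern's sum.
import Mathlib
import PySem

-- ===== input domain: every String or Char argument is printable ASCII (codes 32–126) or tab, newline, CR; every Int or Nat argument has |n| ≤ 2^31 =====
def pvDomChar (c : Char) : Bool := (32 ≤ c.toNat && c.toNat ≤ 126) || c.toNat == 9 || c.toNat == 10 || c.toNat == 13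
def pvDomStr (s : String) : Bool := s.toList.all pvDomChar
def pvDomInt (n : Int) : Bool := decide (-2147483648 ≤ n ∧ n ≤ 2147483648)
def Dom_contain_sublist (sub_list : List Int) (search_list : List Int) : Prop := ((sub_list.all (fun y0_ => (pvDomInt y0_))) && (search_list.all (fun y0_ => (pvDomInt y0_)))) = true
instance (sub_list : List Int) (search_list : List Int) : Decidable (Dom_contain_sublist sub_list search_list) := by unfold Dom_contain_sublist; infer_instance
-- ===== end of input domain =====

-- B replaces A's per-position slice comparison with a Rabin-Karp-style rolling checksum
-- over the doubled list: O(1) window-sum update per shift, slice compared only on checksum hits.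

-- ===== PORT A =====
-- 'for ii in range(len(search_list)): if ext_l[ii:ii+len(sub_list)] == sub_list: return True'
def pvLoopA (sub ext : List Int) : List Nat → Bool
  | [] => false
  | ii :: rest =>
    if PySem.List.slice ext (some (ii : Int)) (some ((ii : Int) + (sub.length : Int))) = sub
    then true else pvLoopA sub ext rest

def contain_sublist (sub_list : List Int) (search_list : List Int) : Bool :=
  if sub_list.length > search_list.length then false
  else if sub_list = search_list then true
  else
    let len_sub := sub_list.length
    let ext_l := search_list ++ PySem.List.slice search_list none (some ((len_sub : Int) - 1))
    pvLoopA sub_list ext_l (List.range search_list.length)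

-- ===== PORT B =====
-- rolling-checksum loop; 'h += ext[ii+m] - ext[ii]' is ported with pyGetD: both indices are
-- guarded by 'ii + m < len(ext)', so the access is always in range and pyGetD is exact there.
def pvLoopB (sub ext : List Int) (target : Int) : List Nat → Int → Bool
  | [], _ => false
  | ii :: rest, h =>
    if h = target ∧ PySem.List.slice ext (some (ii : Int)) (some ((ii : Int) + (sub.length : Int))) = sub
    then true
    else
      pvLoopB sub ext target rest
        (if (ii : Int) + (sub.length : Int) < (ext.length : Int)
         then h + (PySem.List.pyGetD ext ((ii : Int) + (sub.length : Int)) 0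
                    - PySem.List.pyGetD ext (ii : Int) 0)
         else h)

def contain_sublist_alt (sub_list : List Int) (search_list : List Int) : Bool :=
  if sub_list.length > search_list.length then false
  else if sub_list.length = 0 then true
  else
    let ext := search_list ++ PySem.List.slice search_list none (some ((sub_list.length : Int) - 1))
    pvLoopB sub_list ext sub_list.sum (List.range search_list.length)
      (PySem.List.slice ext none (some (sub_list.length : Int))).sum

-- ===== PRECONDITION & SPEC =====
def Spec_contain_sublist (sub_list : List Int) (search_list : List Int) (out : Bool) : Prop := out = contain_sublist_alt sub_list search_list
instance (sub_list : List Int) (search_list : List Int) (out : Bool) : Decidable (Spec_contain_sublist sub_list search_list out) := by unfold Spec_contain_sublist; infer_instance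

-- ===== CLAIM (what is proved, stated in full; the proofs are below) =====
def Claim_equal_contain_sublist : Prop := ∀ (sub_list : List Int) (search_list : List Int), Dom_contain_sublist sub_list search_list → Spec_contain_sublist sub_list search_list (contain_sublist sub_list search_list)

-- ===== LEMMAS AND PROOFS =====

-- the window of the two loops, as drop/take
lemma pv_window (ext sub : List Int) (ii : Nat) :
    PySem.List.slice ext (some (ii : Int)) (some ((ii : Int) + (sub.length : Int)))
      = (ext.drop ii).take sub.length :=
  PySem.List.slice_natCast_add ext ii sub.length

-- shifting the window by one changes its sum by (entering element − leaving element)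
lemma pv_sum_shift (l : List Int) (i m : Nat) (hm : 1 ≤ m) (hlen : i + m < l.length) :
    ((l.drop (i + 1)).take m).sum = ((l.drop i).take m).sum + (l[i + m]'hlen - l[i]'(by omega)) := by
  obtain ⟨m', rfl⟩ : ∃ m', m = m' + 1 := ⟨m - 1, by omega⟩
  have hd : l.drop i = l[i]'(by omega) :: l.drop (i + 1) := List.drop_eq_getElem_cons (by omega)
  have h1 : (l.drop i).take (m' + 1) = l[i]'(by omega) :: (l.drop (i + 1)).take m' := by
    rw [hd, List.take_succ_cons]
  have h3 : (l.drop (i + 1))[m']? = some (l[i + (m' + 1)]'hlen) := by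
    rw [List.getElem?_drop, List.getElem?_eq_getElem (by omega)]
    exact congrArg some (getElem_congr rfl (by omega) (by omega))
  have h2 : (l.drop (i + 1)).take (m' + 1) = (l.drop (i + 1)).take m' ++ [l[i + (m' + 1)]'hlen] := by
    rw [List.take_add_one, h3]
    simp
  rw [h1, h2]
  simp
  ring

-- the two loops agree while the checksum invariant 'h = sum of the current window' holds
lemma pv_loop_eq (sub ext : List Int) (n : Nat) (hm : 1 ≤ sub.length)
    (hext : ext.length + 1 = n + sub.length) :
    ∀ (k ii : Nat) (h : Int), ii + k = n →
      h = ((ext.drop ii).take sub.length).sum →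
      pvLoopB sub ext sub.sum (List.range' ii k) h = pvLoopA sub ext (List.range' ii k) := by
  intro k
  induction k with
  | zero => intro ii h _ _; rfl
  | succ k ih =>
    intro ii h hik hinv
    rw [List.range'_succ]
    by_cases hw : (ext.drop ii).take sub.length = sub
    · have hh : h = sub.sum := by rw [hinv, hw]
      simp [pvLoopA, pvLoopB, pv_window, hw, hh]
    · simp only [pvLoopA, pvLoopB, pv_window, hw, and_false, if_false]
      cases k with
      | zero => rfl
      | succ k' =>
        have hlt : ii + sub.length < ext.length := by omega
        have hguard : ((ii : Int) + (sub.length : Int) < (ext.length : Int)) := by omega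
        rw [if_pos hguard]
        apply ih (ii + 1) _ (by omega)
        have ecast : (ii : Int) + (sub.length : Int) = ((ii + sub.length : Nat) : Int) := by
          push_cast; ring
        rw [ecast, PySem.List.pyGetD_natCast, PySem.List.pyGetD_natCast,
          List.getD_eq_getElem ext 0 hlt, List.getD_eq_getElem ext 0 (by omega : ii < ext.length),
          hinv, pv_sum_shift ext ii sub.length hm hlt]

-- ===== VERDICT (by name: the statement is the Claim_ definition above) =====
theorem contain_sublist_spec : Claim_equal_contain_sublist := by
  intro sub srch _
  unfold Spec_contain_sublist
  unfold contain_sublist contain_sublist_alt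
  by_cases hgt : sub.length > srch.length
  · simp [hgt]
  · simp only [if_neg hgt]
    by_cases hm0 : sub.length = 0
    · rw [if_pos hm0]
      have hsub : sub = [] := List.length_eq_zero_iff.mp hm0
      subst hsub
      cases srch with
      | nil => simp
      | cons x s =>
        rw [if_neg (by simp)]
        rw [List.range_eq_range', List.length_cons, List.range'_succ]
        rw [pvLoopA, if_pos]
        rw [pv_window]
        simp
    · rw [if_neg hm0]
      have hm : 1 ≤ sub.length := by omega
      set m := sub.length with hmdef
      set n := srch.length with hndef
      have hcast : ((m : Int) - 1) = ((m - 1 : Nat) : Int) := by omega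
      set ext := srch ++ PySem.List.slice srch none (some ((m : Int) - 1)) with hext
      have hextlen : ext.length + 1 = n + m := by
        rw [hext, hcast, PySem.List.slice_to_natCast]
        simp only [List.length_append, List.length_take]
        omega
      have hinv0 : (PySem.List.slice ext none (some (m : Int))).sum
          = ((ext.drop 0).take m).sum := by
        rw [PySem.List.slice_to_natCast, List.drop_zero]
      have hloop := pv_loop_eq sub ext n hm hextlen n 0 _ (by omega) hinv0
      rw [List.range_eq_range']
      by_cases heq : sub = srch
      · rw [if_pos heq]
        rw [hloop]
        obtain ⟨n', hn'⟩ : ∃ n', n = n' + 1 := ⟨n - 1, by omega⟩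
        rw [hn', List.range'_succ, pvLoopA, if_pos]
        rw [pv_window, List.drop_zero]
        rw [heq, List.take_left]
      · rw [if_neg heq]
        exact hloop.symm
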